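-- pv_equiv track=rewrite | github.com/Srivastav-Anmol/Niet_CodeTantra_Python | Competitive Coding-1/problem on Strings/CTP30494.py | consecutiveString
-- ===== SOURCE A (Python) =====
-- def consecutiveString(S):
--     stack=[]
--     for char in S:
--         if not stack or stack[-1]!=char:
--             stack.append(char)
--         elif len(stack)<2 or stack[-2]!=char:
--             stack.append(char)
--     return ''.join(stack)
-- ===== SOURCE B (Python) =====
-- from itertools import groupby
--
-- def consecutiveString(S):
--     out = []
--     for ch, grp in groupby(S):
--         n = sum(1 for _ in grp)
--         out.append(ch * min(2, n))
--     return ''.join(out)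
-- ===== Notes on version B (the rewrite author's own statement) =====
-- stated objective: idiomatic
-- what changed: Replaced the per-character stack with backward peeks by itertools.groupby over maximal runs, emitting each run's character min(2, run length) times.
import Mathlib
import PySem

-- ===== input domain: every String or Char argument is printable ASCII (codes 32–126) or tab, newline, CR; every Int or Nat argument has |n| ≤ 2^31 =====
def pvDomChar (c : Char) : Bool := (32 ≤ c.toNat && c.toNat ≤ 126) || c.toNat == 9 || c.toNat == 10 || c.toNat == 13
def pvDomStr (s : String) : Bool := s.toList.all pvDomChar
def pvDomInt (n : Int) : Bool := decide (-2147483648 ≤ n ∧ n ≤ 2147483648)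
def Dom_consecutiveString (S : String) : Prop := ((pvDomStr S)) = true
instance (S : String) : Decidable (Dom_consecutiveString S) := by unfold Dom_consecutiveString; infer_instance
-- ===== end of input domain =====

-- B replaces A's per-character stack with a walk over maximal runs (groupby),
-- emitting each run's character min(2, run length) times; idiomatic, same cost.

-- ===== PORT A =====
-- one loop step of A: push char unless the stack's last two entries already equal it
def pvStepA (stack : List Char) (c : Char) : List Char :=
  if stack = [] ∨ PySem.List.pyGet? stack (-1) ≠ some c then stack ++ [c]
  else if stack.length < 2 ∨ PySem.List.pyGet? stack (-2) ≠ some c then stack ++ [c]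
  else stack

def consecutiveString (S : String) : String :=
  String.mk (S.toList.foldl pvStepA [])

-- ===== PORT B =====
-- maximal runs of equal adjacent characters, as (char, run length) — itertools.groupby
def pvRuns : List Char → List (Char × Nat)
  | [] => []
  | c :: rest =>
      (c, (rest.takeWhile (· == c)).length + 1) :: pvRuns (rest.dropWhile (· == c))
  termination_by l => l.length
  decreasing_by
    simpa using Nat.lt_succ_of_le (List.length_dropWhile_le (· == c) rest)

def consecutiveString_alt (S : String) : String :=
  String.mk ((pvRuns S.toList).flatMap (fun p => List.replicate (min 2 p.2) p.1))

-- ===== PRECONDITION & SPEC =====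
def Spec_consecutiveString (S : String) (out : String) : Prop := out = consecutiveString_alt S
instance (S : String) (out : String) : Decidable (Spec_consecutiveString S out) := by unfold Spec_consecutiveString; infer_instance

-- ===== CLAIM (what is proved, stated in full; the proofs are below) =====
def Claim_equal_consecutiveString : Prop := ∀ (S : String), Dom_consecutiveString S → Spec_consecutiveString S (consecutiveString S)

-- ===== LEMMAS AND PROOFS =====

-- A pushes when the stack does not end with c
theorem pvStepA_push (acc : List Char) (c : Char) (h : acc.getLast? ≠ some c) :
    pvStepA acc c = acc ++ [c] := by
  unfold pvStepA
  rw [if_pos (Or.inr (by rw [PySem.List.pyGet?_neg_one]; exact h))]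

-- A pushes a second copy when exactly one c sits on top
theorem pvStepA_push2 (acc : List Char) (c : Char) (h : acc.getLast? ≠ some c) :
    pvStepA (acc ++ [c]) c = acc ++ [c, c] := by
  unfold pvStepA
  rw [if_neg (by
    push_neg
    exact ⟨by simp, by rw [PySem.List.pyGet?_neg_one_append_singleton]⟩)]
  rcases acc.eq_nil_or_concat with rfl | ⟨ys, y, rfl⟩
  · rw [if_pos (Or.inl (by simp))]; simp
  · rw [if_pos (Or.inr ?_)]
    · simp
    · rw [PySem.List.pyGet?_neg_ofNat _ 2 (by omega) (by simp)]
      have hy : (ys.concat y ++ [c])[(ys.concat y ++ [c]).length - 2]? = some y := by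
        simp [List.concat_eq_append]
      rw [hy]
      intro he
      have hyc : y = c := Option.some.inj he
      subst hyc
      exact h (by simp)

-- A drops every further copy once two c's sit on top
theorem pvStepA_skip (acc : List Char) (c : Char) :
    pvStepA (acc ++ [c, c]) c = acc ++ [c, c] := by
  unfold pvStepA
  rw [if_neg, if_neg]
  · push_neg
    refine ⟨by simp, ?_⟩
    have : acc ++ [c, c] = (acc ++ [c]) ++ [c] := by simp
    rw [this, PySem.List.pyGet?_neg_ofNat _ 2 (by omega) (by simp)]
    simp
  · push_neg
    refine ⟨by simp, ?_⟩
    have : acc ++ [c, c] = (acc ++ [c]) ++ [c] := by simp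
    rw [this, PySem.List.pyGet?_neg_one_append_singleton]

-- with two c's on top, a whole block of further c's is a no-op
theorem pvFoldA_skip_run (acc : List Char) (c : Char) (m : Nat) (rest : List Char) :
    (List.replicate m c ++ rest).foldl pvStepA (acc ++ [c, c]) =
      rest.foldl pvStepA (acc ++ [c, c]) := by
  induction m with
  | zero => simp
  | succ k ih => simpa [List.replicate_succ, pvStepA_skip] using ih

-- processing one maximal run of length n appends min 2 n copies
theorem pvFoldA_run (acc : List Char) (c : Char) (n : Nat) (hn : 1 ≤ n)
    (rest : List Char) (h : acc.getLast? ≠ some c) :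
    (List.replicate n c ++ rest).foldl pvStepA acc =
      rest.foldl pvStepA (acc ++ List.replicate (min 2 n) c) := by
  match n, hn with
  | 1, _ => simp [List.replicate_succ, pvStepA_push acc c h]
  | (k+2), _ =>
    have h2 : min 2 (k + 2) = 2 := by omega
    rw [h2]
    have : List.replicate (k + 2) c ++ rest = c :: c :: (List.replicate k c ++ rest) := by
      simp [List.replicate_succ]
    rw [this]
    simp only [List.foldl_cons, pvStepA_push acc c h, pvStepA_push2 acc c h]
    have : acc ++ List.replicate 2 c = acc ++ [c, c] := by simp [List.replicate_succ]
    rw [this, pvFoldA_skip_run]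

-- a takeWhile (· == c) block is a replicate block
theorem pvTakeWhile_replicate (c : Char) (l : List Char) :
    l.takeWhile (· == c) = List.replicate (l.takeWhile (· == c)).length c := by
  rw [List.eq_replicate_iff]
  exact ⟨rfl, fun b hb => by simpa using List.mem_takeWhile_imp hb⟩

-- the head of dropWhile (· == c) is not c
theorem pvDropWhile_head (c : Char) (l : List Char) (x : Char) (xs : List Char)
    (hd : l.dropWhile (· == c) = x :: xs) : x ≠ c := by
  have h1 := List.head_dropWhile_not (p := (· == c)) (l := l) (by rw [hd]; simp)
  have h2 : (l.dropWhile (· == c)).head (by rw [hd]; simp) = x := by simp [hd]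
  rw [h2] at h1
  simpa using h1

-- main invariant: folding A over l from a stack not ending in l's head
-- appends exactly B's flatMap over the runs of l
theorem pvMain (l : List Char) :
    ∀ acc : List Char, (∀ x xs, l = x :: xs → acc.getLast? ≠ some x) →
      l.foldl pvStepA acc =
        acc ++ (pvRuns l).flatMap (fun p => List.replicate (min 2 p.2) p.1) := by
  induction l using pvRuns.induct with
  | case1 => intro acc _; simp [pvRuns]
  | case2 c rest ih =>
    intro acc hacc
    have hsplit : c :: rest =
        List.replicate ((rest.takeWhile (· == c)).length + 1) c ++ rest.dropWhile (· == c) := by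
      conv_lhs => rw [← List.takeWhile_append_dropWhile (p := (· == c)) (l := rest)]
      rw [List.replicate_succ]
      simp [← pvTakeWhile_replicate c rest]
    have hruns : pvRuns (c :: rest) =
        (c, (rest.takeWhile (· == c)).length + 1) :: pvRuns (rest.dropWhile (· == c)) := by
      rw [pvRuns]
    have hlast : (acc ++ List.replicate (min 2 ((rest.takeWhile (· == c)).length + 1)) c).getLast? = some c := by
      rcases Nat.lt_or_ge ((rest.takeWhile (· == c)).length + 1) 2 with h2 | h2
      · have hm : min 2 ((rest.takeWhile (· == c)).length + 1) = 1 := by omega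
        rw [hm]; simp
      · have hm : min 2 ((rest.takeWhile (· == c)).length + 1) = 2 := by omega
        rw [hm]
        have he : acc ++ List.replicate 2 c = (acc ++ [c]) ++ [c] := by
          simp [List.replicate_succ]
        rw [he]; simp
    conv_lhs => rw [hsplit]
    rw [pvFoldA_run acc c _ (by omega) _ (hacc c rest rfl), ih _ ?_, hruns]
    · simp
    · intro x xs hx
      rw [hlast]
      intro he
      exact pvDropWhile_head c rest x xs hx (Option.some.inj he).symm

-- ===== VERDICT (by name: the statement is the Claim_ definition above) =====
theorem consecutiveString_spec : Claim_equal_consecutiveString := by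
  intro S _
  show _ = _
  unfold consecutiveString consecutiveString_alt
  rw [pvMain S.toList [] (by intro x xs _; simp)]
  simp
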